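-- pv_equiv track=rewrite | github.com/IDA-TUBS/pycpa_single_frame_analysis | sync_single_frame_analysis/schedulers.py | get_next_value
-- ===== SOURCE A (Python) =====
-- def get_next_value(sy_schedule, current_ts):
--
--
--     # first get the minimum:
--     minimum_value = sy_schedule[0][0]
--     one_above_value = None
--
--
--
--     for i in range(0,len(sy_schedule)):
--
--         if sy_schedule[i][0] < minimum_value:
--             minimum_value = sy_schedule[i][0]
--
--         if one_above_value == None:
--             if sy_schedule[i][0] > current_ts:
--                 one_above_value = sy_schedule[i][0]
--         else:
--             if sy_schedule[i][0] > current_ts and sy_schedule[i][0] < one_above_value: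
--                 one_above_value = sy_schedule[i][0]
--
--
--
--     if one_above_value == None:
--         return minimum_value
--     return one_above_value
-- ===== SOURCE B (Python) =====
-- def get_next_value(sy_schedule, current_ts):
--     firsts = [r[0] for r in sy_schedule]
--     above = [x for x in firsts if x > current_ts]
--     return min(above) if above else min(firsts)
-- ===== Notes on version B (the rewrite author's own statement) =====
-- stated objective: simpler
-- what changed: Replaces A's single interleaved loop with two conditionals and an Option-tracked running minimum by two plain comprehensions (first elements, then those above current_ts) and built-in min.
import Mathlib
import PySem

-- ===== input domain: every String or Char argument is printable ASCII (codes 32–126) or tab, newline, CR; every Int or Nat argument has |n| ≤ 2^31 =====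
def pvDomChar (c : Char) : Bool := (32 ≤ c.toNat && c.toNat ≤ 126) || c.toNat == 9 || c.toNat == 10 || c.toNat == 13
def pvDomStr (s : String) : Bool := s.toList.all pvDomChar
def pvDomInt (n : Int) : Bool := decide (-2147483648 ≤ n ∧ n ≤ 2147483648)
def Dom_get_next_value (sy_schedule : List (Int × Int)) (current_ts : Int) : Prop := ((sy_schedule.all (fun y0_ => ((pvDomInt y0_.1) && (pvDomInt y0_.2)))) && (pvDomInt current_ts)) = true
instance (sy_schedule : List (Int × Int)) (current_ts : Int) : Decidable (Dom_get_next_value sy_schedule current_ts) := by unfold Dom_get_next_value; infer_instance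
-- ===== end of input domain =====

-- B: two plain filter/min passes instead of A's single interleaved loop with an Option accumulator; same O(n) cost.


-- ===== PORT A =====
-- literal transliteration: the for-loop over the schedule carrying (minimum_value, one_above_value)
def get_next_value (sy_schedule : List (Int × Int)) (current_ts : Int) : Int :=
  match sy_schedule with
  | [] => 0  -- Python raises IndexError here; excluded by Pre_
  | (h0 :: _) =>
    let st := sy_schedule.foldl (fun (p : Int × Option Int) r =>
      let minimum_value := if r.1 < p.1 then r.1 else p.1
      let one_above_value :=
        match p.2 with
        | none => if r.1 > current_ts then some r.1 else none
        | some v => if r.1 > current_ts ∧ r.1 < v then some r.1 else some v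
      (minimum_value, one_above_value)) (h0.1, none)
    match st.2 with
    | none => st.1
    | some v => v

-- ===== PORT B =====
-- literal transliteration of Source B: firsts, above-filter, min with fallback
def get_next_value_alt (sy_schedule : List (Int × Int)) (current_ts : Int) : Int :=
  let firsts := sy_schedule.map Prod.fst
  let above := firsts.filter (fun x => current_ts < x)
  match PySem.List.min? above (fun x => x) with
  | some v => v
  | none =>
    match PySem.List.min? firsts (fun x => x) with
    | some v => v
    | none => 0  -- Python raises here (empty schedule); excluded by Pre_

-- ===== PRECONDITION & SPEC =====
-- A raises IndexError (and B ValueError) on an empty schedule; that is the only excluded input.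
def Pre_get_next_value (sy_schedule : List (Int × Int)) (current_ts : Int) : Prop := sy_schedule ≠ []
instance (sy_schedule : List (Int × Int)) (current_ts : Int) : Decidable (Pre_get_next_value sy_schedule current_ts) := by unfold Pre_get_next_value; infer_instance
def pvWitness_get_next_value : (List (Int × Int)) × Int := ([(3, 1), (1, 2), (5, 0)], 2)

def Spec_get_next_value (sy_schedule : List (Int × Int)) (current_ts : Int) (out : Int) : Prop := out = get_next_value_alt sy_schedule current_ts
instance (sy_schedule : List (Int × Int)) (current_ts : Int) (out : Int) : Decidable (Spec_get_next_value sy_schedule current_ts out) := by unfold Spec_get_next_value; infer_instance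

-- ===== CLAIM (what is proved, stated in full; the proofs are below) =====
def Claim_equal_get_next_value : Prop := ∀ (sy_schedule : List (Int × Int)) (current_ts : Int), Dom_get_next_value sy_schedule current_ts → Pre_get_next_value sy_schedule current_ts → Spec_get_next_value sy_schedule current_ts (get_next_value sy_schedule current_ts)

-- ===== LEMMAS AND PROOFS =====

-- A's loop body, named for the proofs
def pvStepA (current_ts : Int) (p : Int × Option Int) (r : Int × Int) : Int × Option Int :=
  (if r.1 < p.1 then r.1 else p.1,
   match p.2 with
   | none => if r.1 > current_ts then some r.1 else none
   | some v => if r.1 > current_ts ∧ r.1 < v then some r.1 else some v)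

lemma pvFoldA_fst (current_ts : Int) (l : List (Int × Int)) (m : Int) (o : Option Int) :
    (l.foldl (pvStepA current_ts) (m, o)).1 = (l.map Prod.fst).foldl min m := by
  induction l generalizing m o with
  | nil => rfl
  | cons r t ih =>
    simp only [List.foldl, List.map]
    rw [ih]
    congr 1
    simp [pvStepA, min_def]
    split_ifs <;> omega

lemma pvFoldA_snd (current_ts : Int) (l : List (Int × Int)) (m : Int) (o : Option Int) :
    (l.foldl (pvStepA current_ts) (m, o)).2 =
      ((l.map Prod.fst).filter (fun x => current_ts < x)).foldl
        (fun (o : Option Int) x => some (match o with | none => x | some v => min v x)) o := by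
  induction l generalizing m o with
  | nil => rfl
  | cons r t ih =>
    simp only [List.foldl, List.map, List.filter_cons]
    rw [ih]
    by_cases h : current_ts < r.1
    · simp only [h, decide_true, if_true, List.foldl]
      congr 1
      cases o with
      | none => simp [pvStepA, h]
      | some v =>
        simp only [pvStepA, h, true_and]
        split_ifs with h2 <;> simp only [Option.some.injEq, min_def] <;> split_ifs <;> omega
    · simp only [h, decide_false]
      congr 1
      cases o with
      | none => simp [pvStepA, h]
      | some v => simp [pvStepA, h]

lemma pvOptFold_some (l : List Int) (v : Int) :
    l.foldl (fun (o : Option Int) x => some (match o with | none => x | some v => min v x)) (some v)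
      = some (l.foldl min v) := by
  induction l generalizing v with
  | nil => rfl
  | cons x t ih => simp only [List.foldl]; exact ih (min v x)

lemma pvOptFold_none (l : List Int) :
    l.foldl (fun (o : Option Int) x => some (match o with | none => x | some v => min v x)) none
      = PySem.List.min? l (fun x => x) := by
  cases l with
  | nil => rfl
  | cons x t =>
    rw [PySem.List.min?_id_cons]
    simp only [List.foldl]
    exact pvOptFold_some t x

-- ===== VERDICT (by name: the statement is the Claim_ definition above) =====
theorem get_next_value_spec : Claim_equal_get_next_value := by
  intro sy_schedule current_ts _ hpre
  unfold Spec_get_next_value get_next_value get_next_value_alt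
  cases sy_schedule with
  | nil => exact absurd rfl hpre
  | cons h0 t =>
    simp only
    have hsnd := pvFoldA_snd current_ts (h0 :: t) h0.1 none
    have hfst := pvFoldA_fst current_ts (h0 :: t) h0.1 none
    rw [show (fun (p : Int × Option Int) (r : Int × Int) =>
        (if r.1 < p.1 then r.1 else p.1,
         match p.2 with
         | none => if r.1 > current_ts then some r.1 else none
         | some v => if r.1 > current_ts ∧ r.1 < v then some r.1 else some v))
        = pvStepA current_ts from rfl]
    rw [pvOptFold_none] at hsnd
    cases hmin : PySem.List.min? (((h0 :: t).map Prod.fst).filter (fun x => current_ts < x)) (fun x => x) with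
    | some v =>
      rw [hmin] at hsnd
      simp only [hsnd]
    | none =>
      rw [hmin] at hsnd
      simp only [hsnd, hfst, List.map]
      rw [PySem.List.min?_id_cons]
      simp [List.foldl]
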